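-- pv_equiv track=rewrite | github.com/jd-develop/advent-of-code | 2024/22/puzzle.py | best_sequences_for_buyer
-- ===== SOURCE A (Python) =====
-- def best_sequences_for_buyer(prices: list[int]) -> set[tuple[int, int, int, int]]:
--     maximum = max(prices[4:])
--     result: set[tuple[int, int, int, int]] = set()
--
--     for i in range(4, len(prices)):
--         if prices[i] == maximum:
--             last_changes = (prices[i-3]-prices[i-4], prices[i-2]-prices[i-3], prices[i-1]-prices[i-2], prices[i]-prices[i-1])
--             result.add(last_changes)
--
--     return result
-- ===== SOURCE B (Python) =====
-- def best_sequences_for_buyer(prices: list[int]) -> set[tuple[int, int, int, int]]: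
--     if len(prices) <= 4:
--         # no price after the first four: invalid input (A's max(prices[4:]) raises the same)
--         raise ValueError("max() arg is an empty sequence")
--     best = None
--     result: set[tuple[int, int, int, int]] = set()
--     for i in range(4, len(prices)):
--         p = prices[i]
--         changes = (prices[i-3]-prices[i-4], prices[i-2]-prices[i-3],
--                    prices[i-1]-prices[i-2], p-prices[i-1])
--         if best is None or p > best:
--             best = p
--             result = {changes}
--         elif p == best:
--             result.add(changes)
--     return result
-- ===== Notes on version B (the rewrite author's own statement) =====
-- stated objective: alternative
-- what changed: Replaces A's two-phase scheme (take max of the slice prices[4:], then a second pass collecting tuples at that max) by one single pass that maintains a running maximum and resets/extends the result set as the maximum grows.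
-- outside the precondition, e.g. on best_sequences_for_buyer([]): A raises ValueError, B raises ValueError
import Mathlib
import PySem

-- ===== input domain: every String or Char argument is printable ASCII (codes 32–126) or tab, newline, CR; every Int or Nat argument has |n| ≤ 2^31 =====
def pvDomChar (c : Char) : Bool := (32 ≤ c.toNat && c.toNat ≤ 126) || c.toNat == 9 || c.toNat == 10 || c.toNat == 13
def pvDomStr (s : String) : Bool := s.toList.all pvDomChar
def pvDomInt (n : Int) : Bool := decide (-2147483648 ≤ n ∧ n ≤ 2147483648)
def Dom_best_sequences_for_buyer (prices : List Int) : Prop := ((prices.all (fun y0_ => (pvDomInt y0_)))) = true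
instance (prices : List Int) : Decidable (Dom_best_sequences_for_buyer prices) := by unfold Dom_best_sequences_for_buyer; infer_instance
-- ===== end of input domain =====

-- B replaces A's two-phase scheme (max of prices[4:], then a collecting pass) by a single pass
-- with a running maximum that resets the result set on a new maximum (objective: alternative).


-- ===== PORT A =====
-- the 4-tuple of last changes (prices[i-3]-prices[i-4], …, prices[i]-prices[i-1]); the same
-- expression appears verbatim in both Pythons. Indices are always in range inside both loops,
-- so pyGetD with default 0 is exact.
def pvChanges (prices : List Int) (i : Int) : Int × Int × Int × Int :=
  (PySem.List.pyGetD prices (i-3) 0 - PySem.List.pyGetD prices (i-4) 0,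
   PySem.List.pyGetD prices (i-2) 0 - PySem.List.pyGetD prices (i-3) 0,
   PySem.List.pyGetD prices (i-1) 0 - PySem.List.pyGetD prices (i-2) 0,
   PySem.List.pyGetD prices i 0 - PySem.List.pyGetD prices (i-1) 0)

-- literal port of A: maximum = max(prices[4:]) (none = ValueError, excluded by Pre_),
-- then one pass adding the change-tuple wherever prices[i] == maximum.
def best_sequences_for_buyer (prices : List Int) : List (Int × Int × Int × Int) :=
  match PySem.List.max? (PySem.List.slice prices (some 4) none) (fun y => y) with
  | none => []  -- max([]) raises ValueError in Python; outside Pre_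
  | some maximum =>
    (PySem.List.pyRange 4 (prices.length : Int)).foldl
      (fun result i =>
        if PySem.List.pyGetD prices i 0 = maximum
        then PySem.Set.add result (pvChanges prices i)
        else result)
      PySem.Set.empty

-- ===== PORT B =====
-- literal port of Source B: guard the invalid short input (ValueError, outside Pre_), then a
-- single pass, state = (running maximum 'best', result set).
def best_sequences_for_buyer_alt (prices : List Int) : List (Int × Int × Int × Int) :=
  if prices.length ≤ 4 then []  -- raise ValueError in Python; outside Pre_
  else
  ((PySem.List.pyRange 4 (prices.length : Int)).foldl
    (fun (st : Option Int × PySem.Set (Int × Int × Int × Int)) i =>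
      let p := PySem.List.pyGetD prices i 0
      let changes := pvChanges prices i
      match st.1 with
      | none => (some p, [changes])
      | some best =>
        if best < p then (some p, [changes])
        else if p = best then (st.1, PySem.Set.add st.2 changes)
        else st)
    (none, PySem.Set.empty)).2

-- ===== PRECONDITION & SPEC =====
-- Pre_ excludes exactly the inputs on which A raises: fewer than 5 prices make prices[4:] empty
-- and max([]) raise ValueError.
def Pre_best_sequences_for_buyer (prices : List Int) : Prop := 5 ≤ prices.length
instance (prices : List Int) : Decidable (Pre_best_sequences_for_buyer prices) := by unfold Pre_best_sequences_for_buyer; infer_instance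
def pvWitness_best_sequences_for_buyer : List Int := [1, 2, 3, 4, 5, 3]

def Spec_best_sequences_for_buyer (prices : List Int) (out : List (Int × Int × Int × Int)) : Prop := out = best_sequences_for_buyer_alt prices
instance (prices : List Int) (out : List (Int × Int × Int × Int)) : Decidable (Spec_best_sequences_for_buyer prices out) := by unfold Spec_best_sequences_for_buyer; infer_instance

-- ===== CLAIM (what is proved, stated in full; the proofs are below) =====
def Claim_equal_best_sequences_for_buyer : Prop := ∀ (prices : List Int), Dom_best_sequences_for_buyer prices → Pre_best_sequences_for_buyer prices → Spec_best_sequences_for_buyer prices (best_sequences_for_buyer prices)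

-- ===== LEMMAS AND PROOFS =====

-- A's loop body / B's loop body, named for the proofs
def pvStepA (prices : List Int) (maximum : Int)
    (result : PySem.Set (Int × Int × Int × Int)) (i : Int) : PySem.Set (Int × Int × Int × Int) :=
  if PySem.List.pyGetD prices i 0 = maximum
  then PySem.Set.add result (pvChanges prices i)
  else result

def pvStepB (prices : List Int)
    (st : Option Int × PySem.Set (Int × Int × Int × Int)) (i : Int) :
    Option Int × PySem.Set (Int × Int × Int × Int) :=
  let p := PySem.List.pyGetD prices i 0
  let changes := pvChanges prices i
  match st.1 with
  | none => (some p, [changes])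
  | some best =>
    if best < p then (some p, [changes])
    else if p = best then (st.1, PySem.Set.add st.2 changes)
    else st

lemma pvStepA_const (prices : List Int) (M : Int) (l : List Int) (S : PySem.Set (Int × Int × Int × Int))
    (h : ∀ i ∈ l, PySem.List.pyGetD prices i 0 ≠ M) :
    l.foldl (pvStepA prices M) S = S := by
  induction l generalizing S with
  | nil => rfl
  | cons x t ih =>
    rw [List.foldl_cons]
    have hx : pvStepA prices M S x = S := by
      simp [pvStepA, h x (List.mem_cons_self)]
    rw [hx]
    exact ih S (fun i hi => h i (List.mem_cons_of_mem _ hi))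

lemma pv_max_append (xs : List Int) (y : Int) :
    PySem.List.max? (xs ++ [y]) (fun z => z) =
      some (match PySem.List.max? xs (fun z => z) with
            | none => y
            | some m => max m y) := by
  cases xs with
  | nil =>
    rw [List.nil_append, PySem.List.max?_id_cons,
      (PySem.List.max?_eq_none_iff ([] : List Int) (fun z => z)).mpr rfl]
    simp
  | cons x t =>
    rw [List.cons_append, PySem.List.max?_id_cons, PySem.List.max?_id_cons,
      List.foldl_append]
    simp

-- the loop invariant: after processing range(4, b), B's state is (the max so far,
-- the tuples A would collect for that max)
lemma pv_invariant (prices : List Int) (b : Int) (hb : 4 ≤ b) :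
    (PySem.List.pyRange 4 b).foldl (pvStepB prices) (none, PySem.Set.empty) =
      match PySem.List.max? ((PySem.List.pyRange 4 b).map (fun i => PySem.List.pyGetD prices i 0)) (fun z => z) with
      | none => (none, PySem.Set.empty)
      | some M => (some M, (PySem.List.pyRange 4 b).foldl (pvStepA prices M) PySem.Set.empty) := by
  induction b, hb using Int.le_induction with
  | base => simp [PySem.List.pyRange_one_eq_nil (by omega : (4:Int) ≤ 4), PySem.List.max?]
  | succ b hb ih =>
    rw [PySem.List.pyRange_one_succ_right hb, List.foldl_append, List.map_append]
    simp only [List.map_cons, List.map_nil]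
    rw [pv_max_append, ih]
    cases hmax : PySem.List.max? ((PySem.List.pyRange 4 b).map (fun i => PySem.List.pyGetD prices i 0)) (fun z => z) with
    | none =>
      have hl : PySem.List.pyRange 4 b = [] := by
        have := (PySem.List.max?_eq_none_iff _ _).mp hmax
        simpa using this
      simp [hl, pvStepB, pvStepA, PySem.Set.add, PySem.Set.empty, PySem.Set.contains]
    | some M =>
      have hle : ∀ i ∈ PySem.List.pyRange 4 b, PySem.List.pyGetD prices i 0 ≤ M := by
        intro i hi
        exact PySem.List.max?_isMax hmax _ (List.mem_map_of_mem hi)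
      by_cases hgt : M < PySem.List.pyGetD prices b 0
      · have hmx : max M (PySem.List.pyGetD prices b 0) = PySem.List.pyGetD prices b 0 :=
          max_eq_right hgt.le
        simp only [List.foldl_cons, List.foldl_nil, hmx]
        have hreset : (PySem.List.pyRange 4 b).foldl (pvStepA prices (PySem.List.pyGetD prices b 0)) PySem.Set.empty = PySem.Set.empty :=
          pvStepA_const _ _ _ _ (fun i hi => by have := hle i hi; omega)
        rw [List.foldl_append, hreset]
        simp [pvStepB, pvStepA, hgt, PySem.Set.add, PySem.Set.empty, PySem.Set.contains]
      · have hmx : max M (PySem.List.pyGetD prices b 0) = M := max_eq_left (not_lt.mp hgt)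
        simp only [List.foldl_cons, List.foldl_nil, hmx]
        rw [List.foldl_append]
        by_cases heq : PySem.List.pyGetD prices b 0 = M
        · simp [pvStepB, pvStepA, heq]
        · simp [pvStepB, pvStepA, hgt, heq]

-- ===== VERDICT (by name: the statement is the Claim_ definition above) =====
theorem best_sequences_for_buyer_spec : Claim_equal_best_sequences_for_buyer := by
  intro prices _ hpre
  have h5 : 5 ≤ prices.length := hpre
  unfold Spec_best_sequences_for_buyer best_sequences_for_buyer best_sequences_for_buyer_alt
  rw [if_neg (by omega : ¬ prices.length ≤ 4)]
  have hmap : (PySem.List.pyRange 4 (prices.length : Int)).map (fun i => PySem.List.pyGetD prices i 0)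
      = PySem.List.slice prices (some 4) none := by
    rw [PySem.List.map_pyGetD_pyRange' prices 0 (by omega : (0:Int) ≤ 4)]
    rw [show PySem.List.slice prices (some 4) none = PySem.List.slice prices (some ((4:Nat):Int)) none by norm_num,
      PySem.List.slice_from_natCast]
    rfl
  have hinv := pv_invariant prices (prices.length : Int) (by exact_mod_cast (by omega : 4 ≤ prices.length) : (4:Int) ≤ (prices.length : Int))
  rw [show (fun (st : Option Int × PySem.Set (Int × Int × Int × Int)) i =>
        let p := PySem.List.pyGetD prices i 0
        let changes := pvChanges prices i
        match st.1 with
        | none => (some p, [changes])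
        | some best =>
          if best < p then (some p, [changes])
          else if p = best then (st.1, PySem.Set.add st.2 changes)
          else st) = pvStepB prices from rfl]
  rw [hinv, hmap]
  cases hmax : PySem.List.max? (PySem.List.slice prices (some 4) none) (fun y => y) with
  | none =>
    exfalso
    have := (PySem.List.max?_eq_none_iff _ _).mp hmax
    rw [← hmap] at this
    have h5 : (4:Int) < (prices.length : Int) := by exact_mod_cast (by omega : 4 < prices.length)
    have : (4:Int) ∈ PySem.List.pyRange 4 (prices.length : Int) :=
      (PySem.List.mem_pyRange_one).mpr ⟨le_refl _, h5⟩
    simp_all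
  | some M => rfl
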